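-- pv_equiv track=rewrite | github.com/Choimoe/MaidataStatistic | effect/pattern.py | check_target_pattern
-- ===== SOURCE A (Python) =====
-- from typing import Callable, Dict, List, Optional, Generator, List, Sequence, TypeVar
-- from typing import Callable, Dict, List, Optional, Generator, List, Sequence, TypeVar
--
-- def check_target_pattern(temporal_roots: Sequence[List[str]], target_pattern: Sequence[str]) -> bool:
--     """
--     Detects consecutive target pattern across temporal positions.
--
--     Args:
--         temporal_roots: Sequence of root note groups, where each group
--             represents notes in a temporal position
--         target_pattern: Sequence of target note
--             Example: ['1', '8', '1', '8', '1', '8', '1', '8']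
--
--     Returns:
--         True if pattern is found in any N-consecutive-position window
--     """
--
--     # Early exit if not enough temporal positions
--     if len(temporal_roots) < len(target_pattern):
--         return False
--
--     # Check each window of consecutive temporal positions
--     for time_window in sliding_window(temporal_roots, len(target_pattern)):
--         # Verify each position contains the required root(s)
--         if all(
--                 # Check if target note exists in current time slot
--                 any(note == target for note in time_slot)
--                 for time_slot, target in zip(time_window, target_pattern)
--         ):
--             return True
--     return False
--
-- T = TypeVar('T')
--
-- def sliding_window(sequence: Sequence[T], window_size: int) -> Generator[Sequence[T], None, None]:
--     """
--     Generates sliding windows of specified size over the input sequence.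
--
--     Args:
--         sequence: Input sequence to process
--         window_size: Number of elements in each window
--
--     Yields:
--         Consecutive subsequences of specified window size
--
--     Example:
--         > > > list(sliding_window([1,2,3,4,5], 3))
--         [[1,2,3], [2,3,4], [3,4,5]]
--     """
--     for i in range(len(sequence) - window_size + 1):
--         yield sequence[i:i + window_size]
-- ===== SOURCE B (Python) =====
-- from typing import List, Sequence
--
-- def check_target_pattern(temporal_roots: Sequence[List[str]], target_pattern: Sequence[str]) -> bool:
--     """Shift-And scan: one left-to-right pass keeping a bitmask of the pattern
--     prefixes that match ending at the current temporal position (no windows)."""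
--     m = len(target_pattern)
--     if len(temporal_roots) < m:
--         return False
--     if m == 0:
--         return True
--     bits = {}
--     for j, target in enumerate(target_pattern):
--         bits[target] = bits.get(target, 0) | (1 << j)
--     goal = 1 << (m - 1)
--     state = 0
--     for time_slot in temporal_roots:
--         mask = 0
--         for note in set(time_slot):
--             mask |= bits.get(note, 0)
--         state = ((state << 1) | 1) & mask
--         if state & goal:
--             return True
--     return False
-- ===== Notes on version B (the rewrite author's own statement) =====
-- stated objective: alternative
-- what changed: Replaced the window-by-window rescan (slice each window, rescan every slot per window) with a single left-to-right Shift-And pass: a precomputed target->bitmask dict and one bitmask of currently matched pattern prefixes per position.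
import Mathlib
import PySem

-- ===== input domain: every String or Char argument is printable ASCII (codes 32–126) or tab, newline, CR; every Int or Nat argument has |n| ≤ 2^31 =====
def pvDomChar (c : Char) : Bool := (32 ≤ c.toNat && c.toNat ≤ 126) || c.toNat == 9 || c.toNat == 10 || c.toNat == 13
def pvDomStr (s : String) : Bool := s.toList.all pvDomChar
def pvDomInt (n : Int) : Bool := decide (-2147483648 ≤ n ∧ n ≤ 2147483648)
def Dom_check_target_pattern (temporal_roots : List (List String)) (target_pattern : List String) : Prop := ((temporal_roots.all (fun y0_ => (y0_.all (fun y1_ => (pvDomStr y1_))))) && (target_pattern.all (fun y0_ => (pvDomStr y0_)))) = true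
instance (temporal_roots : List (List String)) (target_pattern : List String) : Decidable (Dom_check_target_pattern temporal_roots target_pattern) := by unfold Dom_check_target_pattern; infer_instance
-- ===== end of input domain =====

-- B replaces A's window-by-window rescan with a single left-to-right Shift-And
-- pass (a bitmask of currently matched pattern prefixes): an alternative algorithm.

-- ===== PORT A =====
-- A: if len(tr) < len(tp): return False; then for each sliding window,
-- all(any(note == target for note in slot) for slot, target in zip(window, tp)).
def check_target_pattern (temporal_roots : List (List String)) (target_pattern : List String) : Bool :=
  if temporal_roots.length < target_pattern.length then false
  else
    (PySem.List.pyRange 0 ((temporal_roots.length : Int) - (target_pattern.length : Int) + 1) 1).any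
      (fun i =>
        ((PySem.List.slice temporal_roots (some i) (some (i + (target_pattern.length : Int)))).zip
            target_pattern).all
          (fun p => p.1.any (fun note => note == p.2)))

-- ===== PORT B =====
-- bits[target] = bits.get(target, 0) | (1 << j)  over  enumerate(target_pattern)
def pvBitsLoop : List String → Nat → PySem.Dict String Nat → PySem.Dict String Nat
  | [], _, d => d
  | t :: rest, j, d => pvBitsLoop rest (j + 1) (d.insert t ((d.getD t 0) ||| (1 <<< j)))

-- mask = 0; for note in set(time_slot): mask |= bits.get(note, 0)
-- (OR is commutative/associative, so the result does not depend on set order)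
def pvMask (bits : PySem.Dict String Nat) (time_slot : List String) : Nat :=
  (PySem.Set.ofList time_slot).foldl (fun mask note => mask ||| bits.getD note 0) 0

-- for time_slot in temporal_roots: state = ((state << 1) | 1) & mask; if state & goal: return True
def pvScan (bits : PySem.Dict String Nat) (goal : Nat) : List (List String) → Nat → Bool
  | [], _ => false
  | time_slot :: rest, state =>
    let st := ((state <<< 1) ||| 1) &&& pvMask bits time_slot
    if st &&& goal ≠ 0 then true else pvScan bits goal rest st

def check_target_pattern_alt (temporal_roots : List (List String)) (target_pattern : List String) : Bool :=
  if temporal_roots.length < target_pattern.length then false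
  else if target_pattern.length = 0 then true
  else
    pvScan (pvBitsLoop target_pattern 0 PySem.Dict.empty)
      (1 <<< (target_pattern.length - 1)) temporal_roots 0

-- ===== PRECONDITION & SPEC =====
def Spec_check_target_pattern (temporal_roots : List (List String)) (target_pattern : List String) (out : Bool) : Prop := out = check_target_pattern_alt temporal_roots target_pattern
instance (temporal_roots : List (List String)) (target_pattern : List String) (out : Bool) : Decidable (Spec_check_target_pattern temporal_roots target_pattern out) := by unfold Spec_check_target_pattern; infer_instance

-- ===== CLAIM (what is proved, stated in full; the proofs are below) =====
def Claim_equal_check_target_pattern : Prop := ∀ (temporal_roots : List (List String)) (target_pattern : List String), Dom_check_target_pattern temporal_roots target_pattern → Spec_check_target_pattern temporal_roots target_pattern (check_target_pattern temporal_roots target_pattern)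

-- ===== LEMMAS AND PROOFS =====

-- "slot i contains the target of pattern position j" and "a full window starts at s"
def pvMch (tr : List (List String)) (tp : List String) (i j : Nat) : Prop :=
  tp.getD j "" ∈ tr.getD i []

def pvFound (tr : List (List String)) (tp : List String) : Prop :=
  ∃ s, s + tp.length ≤ tr.length ∧ ∀ j < tp.length, pvMch tr tp (s + j) j

lemma zip_all_iff {α β : Type} (f : α → β → Bool) :
    ∀ (xs : List α) (ys : List β),
      ((xs.zip ys).all (fun p => f p.1 p.2)) = true ↔
        ∀ j (h1 : j < xs.length) (h2 : j < ys.length), f xs[j] ys[j] = true := by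
  intro xs
  induction xs with
  | nil => intro ys; simp
  | cons x xs ih =>
    intro ys
    cases ys with
    | nil => simp
    | cons y ys =>
      simp only [List.zip_cons_cons, List.all_cons, Bool.and_eq_true, ih]
      constructor
      · rintro ⟨h0, h⟩ j h1 h2
        cases j with
        | zero => simpa using h0
        | succ j => simpa using h j (by simpa using h1) (by simpa using h2)
      · intro h
        refine ⟨by simpa using h 0 (by simp) (by simp), ?_⟩
        intro j h1 h2
        simpa using h (j + 1) (by simpa using h1) (by simpa using h2)

lemma A_window_iff (tr : List (List String)) (tp : List String) (k : Nat)
    (hk : k + tp.length ≤ tr.length) :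
    (((PySem.List.slice tr (some ((k : Nat) : Int))
          (some (((k : Nat) : Int) + (tp.length : Int)))).zip tp).all
        (fun p => p.1.any (fun note => note == p.2))) = true ↔
      ∀ j < tp.length, pvMch tr tp (k + j) j := by
  rw [PySem.List.slice_natCast_add, zip_all_iff (fun (slot : List String) (t : String) => slot.any (fun note => note == t))]
  have hlen : ((tr.drop k).take tp.length).length = tp.length := by
    simp; omega
  constructor
  · intro h j hj
    have := h j (by omega) hj
    have hkj : k + j < tr.length := by omega
    simp only [List.getElem_take, List.getElem_drop] at this
    unfold pvMch
    rw [List.getD_eq_getElem tr [] hkj, List.getD_eq_getElem tp "" hj]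
    simpa [List.any_eq_true, beq_iff_eq] using this
  · intro h j h1 h2
    have hj : j < tp.length := h2
    have hkj : k + j < tr.length := by omega
    have hm := h j hj
    unfold pvMch at hm
    rw [List.getD_eq_getElem tr [] hkj, List.getD_eq_getElem tp "" hj] at hm
    simp only [List.getElem_take, List.getElem_drop]
    simpa [List.any_eq_true, beq_iff_eq] using hm

lemma A_char (tr : List (List String)) (tp : List String) :
    check_target_pattern tr tp = true ↔ pvFound tr tp := by
  unfold check_target_pattern
  by_cases h : tr.length < tp.length
  · simp only [if_pos h, Bool.false_eq_true, false_iff]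
    rintro ⟨s, hs, -⟩; omega
  · rw [if_neg h, List.any_eq_true]
    constructor
    · rintro ⟨i, hi, hf⟩
      rw [PySem.List.mem_pyRange_one] at hi
      obtain ⟨hi0, hi1⟩ := hi
      lift i to ℕ using hi0 with k
      have hk : k + tp.length ≤ tr.length := by omega
      exact ⟨k, hk, (A_window_iff tr tp k hk).mp hf⟩
    · rintro ⟨s, hs, hw⟩
      refine ⟨(s : Int), ?_, (A_window_iff tr tp s hs).mpr hw⟩
      rw [PySem.List.mem_pyRange_one]
      constructor
      · positivity
      · omega


lemma bits_testBit (t : String) (b : Nat) :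
    ∀ (l : List String) (j0 : Nat) (d : PySem.Dict String Nat),
      ((pvBitsLoop l j0 d).getD t 0).testBit b = true ↔
        ((d.getD t 0).testBit b = true ∨
          ∃ k, ∃ _ : k < l.length, l[k] = t ∧ b = j0 + k) := by
  intro l
  induction l with
  | nil => intro j0 d; simp [pvBitsLoop]
  | cons t0 rest ih =>
    intro j0 d
    rw [pvBitsLoop, ih]
    rw [PySem.Dict.getD_insert]
    constructor
    · rintro (h | ⟨k, hk, hkt, hkb⟩)
      · by_cases ht : t = t0
        · rw [if_pos ht] at h
          rw [Nat.testBit_or, Bool.or_eq_true, Nat.one_shiftLeft] at h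
          rcases h with h | h
          · subst ht; exact Or.inl h
          · rw [Nat.testBit_two_pow] at h
            exact Or.inr ⟨0, by simp, by simp [ht.symm], by simpa using (of_decide_eq_true h).symm⟩
        · rw [if_neg ht] at h; exact Or.inl h
      · exact Or.inr ⟨k + 1, by simpa using hk, by simpa using hkt, by omega⟩
    · rintro (h | ⟨k, hk, hkt, hkb⟩)
      · left
        by_cases ht : t = t0
        · rw [if_pos ht, Nat.testBit_or, Bool.or_eq_true]
          subst ht; exact Or.inl h
        · rw [if_neg ht]; exact h
      · cases k with
        | zero =>
          left
          have ht : t = t0 := by simpa using hkt.symm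
          rw [if_pos ht, Nat.testBit_or, Bool.or_eq_true, Nat.one_shiftLeft,
            Nat.testBit_two_pow]
          exact Or.inr (decide_eq_true (by omega))
        | succ k =>
          right
          exact ⟨k, by simpa using hk, by simpa using hkt, by omega⟩

lemma foldl_or_testBit {α : Type} (g : α → Nat) (b : Nat) :
    ∀ (l : List α) (a0 : Nat),
      (l.foldl (fun a x => a ||| g x) a0).testBit b = true ↔
        (a0.testBit b = true ∨ ∃ x ∈ l, (g x).testBit b = true) := by
  intro l
  induction l with
  | nil => intro a0; simp
  | cons x xs ih =>
    intro a0
    rw [List.foldl_cons, ih]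
    rw [Nat.testBit_or, Bool.or_eq_true]
    constructor
    · rintro (⟨h | h⟩ | ⟨y, hy, h⟩)
      · exact Or.inl h
      · exact Or.inr ⟨x, by simp, h⟩
      · exact Or.inr ⟨y, by simp [hy], h⟩
    · rintro (h | ⟨y, hy, h⟩)
      · exact Or.inl (Or.inl h)
      · rcases List.mem_cons.mp hy with rfl | hy
        · exact Or.inl (Or.inr h)
        · exact Or.inr ⟨y, hy, h⟩

lemma mask_testBit (tp : List String) (slot : List String) (b : Nat) :
    (pvMask (pvBitsLoop tp 0 PySem.Dict.empty) slot).testBit b = true ↔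
      (∃ _ : b < tp.length, tp[b] ∈ slot) := by
  unfold pvMask
  rw [foldl_or_testBit]
  simp only [Nat.zero_testBit, Bool.false_eq_true, false_or]
  constructor
  · rintro ⟨note, hnote, h⟩
    rw [bits_testBit] at h
    rcases h with h | ⟨k, hk, hkt, hkb⟩
    · simp [PySem.Dict.getD_empty] at h
    · subst hkt
      refine ⟨by omega, ?_⟩
      have : b = k := by omega
      subst this
      exact (PySem.Set.mem_ofList _ _).mp hnote
  · rintro ⟨hb, hmem⟩
    refine ⟨tp[b], (PySem.Set.mem_ofList _ _).mpr hmem, ?_⟩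
    rw [bits_testBit]
    exact Or.inr ⟨b, hb, rfl, by omega⟩

lemma shift_one_testBit (state : Nat) (b : Nat) :
    (((state <<< 1) ||| 1).testBit b = true) ↔ (b = 0 ∨ (1 ≤ b ∧ state.testBit (b - 1) = true)) := by
  rw [Nat.testBit_or, Bool.or_eq_true, Nat.testBit_shiftLeft]
  have h1 : Nat.testBit 1 b = decide (0 = b) := by
    simpa using Nat.testBit_two_pow (n := 0) (m := b)
  rw [h1]
  rcases Nat.eq_zero_or_pos b with rfl | hb
  · simp
  · have hne : ¬ (0 = b) := by omega
    have hle : 1 ≤ b := hb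
    simp [hne, hle]
    omega

lemma and_goal_ne_zero (x mq : Nat) : (x &&& (1 <<< mq) ≠ 0) ↔ x.testBit mq = true := by
  rw [Nat.one_shiftLeft, Nat.and_two_pow]
  cases h : x.testBit mq
  · simp
  · simp

lemma scan_iff (tr : List (List String)) (tp : List String) (hm : tp.length ≠ 0) :
    ∀ (rest : List (List String)) (cn state : Nat),
      rest = tr.drop cn →
      (∀ b, state.testBit b = true ↔
        (b < tp.length ∧ b < cn ∧ ∀ k ≤ b, pvMch tr tp (cn - 1 - b + k) k)) →
      state.testBit (tp.length - 1) = false →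
      (pvScan (pvBitsLoop tp 0 PySem.Dict.empty) (1 <<< (tp.length - 1)) rest state = true ↔
        ∃ s, s + tp.length ≤ tr.length ∧ cn < s + tp.length ∧
          ∀ j < tp.length, pvMch tr tp (s + j) j) := by
  intro rest
  induction rest with
  | nil =>
    intro cn state hdrop _ _
    simp only [pvScan, Bool.false_eq_true, false_iff]
    rintro ⟨s, h1, h2, -⟩
    have hcn : tr.length ≤ cn := List.drop_eq_nil_iff.mp hdrop.symm
    omega
  | cons slot rest ih =>
    intro cn state hdrop hinv hgoal
    have hcn : cn < tr.length := by
      have hlen := congrArg List.length hdrop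
      simp [List.length_drop] at hlen
      omega
    have hslot : tr.getD cn [] = slot := by
      have h0 : tr[cn]? = some slot := by
        have h1 : (tr.drop cn)[0]? = tr[cn + 0]? := List.getElem?_drop
        rw [← hdrop] at h1
        simpa using h1.symm
      rw [List.getD_eq_getElem?_getD, h0]
      rfl
    have hrest : rest = tr.drop (cn + 1) := by
      have : (slot :: rest).drop 1 = (tr.drop cn).drop 1 := by rw [hdrop]
      simpa [List.drop_drop] using this
    have hmask : ∀ b, (pvMask (pvBitsLoop tp 0 PySem.Dict.empty) slot).testBit b = true ↔
        (b < tp.length ∧ pvMch tr tp cn b) := by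
      intro b
      rw [mask_testBit]
      constructor
      · rintro ⟨hb, hmem⟩
        refine ⟨hb, ?_⟩
        unfold pvMch
        rw [hslot, List.getD_eq_getElem tp "" hb]
        exact hmem
      · rintro ⟨hb, hmch⟩
        unfold pvMch at hmch
        rw [hslot, List.getD_eq_getElem tp "" hb] at hmch
        exact ⟨hb, hmch⟩
    have stbit : ∀ b,
        ((((state <<< 1) ||| 1) &&& pvMask (pvBitsLoop tp 0 PySem.Dict.empty) slot).testBit b = true) ↔
          (b < tp.length ∧ b < cn + 1 ∧ ∀ k ≤ b, pvMch tr tp (cn + 1 - 1 - b + k) k) := by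
      intro b
      rw [Nat.testBit_and, Bool.and_eq_true, shift_one_testBit, hmask]
      constructor
      · rintro ⟨hb0 | ⟨hb1, hstate⟩, hbm, hmch⟩
        · subst hb0
          refine ⟨hbm, by omega, ?_⟩
          intro k hk
          have hk0 : k = 0 := by omega
          subst hk0
          simpa using hmch
        · obtain ⟨hbm', hlt, hall⟩ := (hinv (b - 1)).mp hstate
          refine ⟨hbm, by omega, ?_⟩
          intro k hk
          by_cases hkb : k = b
          · subst hkb
            have heq : cn + 1 - 1 - k + k = cn := by omega
            rwa [heq]
          · have h1 := hall k (by omega)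
            have heq : cn - 1 - (b - 1) + k = cn + 1 - 1 - b + k := by omega
            rwa [heq] at h1
      · rintro ⟨hbm, hlt, hall⟩
        refine ⟨?_, hbm, ?_⟩
        · rcases Nat.eq_zero_or_pos b with rfl | hb
          · exact Or.inl rfl
          · refine Or.inr ⟨hb, ?_⟩
            rw [hinv (b - 1)]
            refine ⟨by omega, by omega, ?_⟩
            intro k hk
            have h1 := hall k (by omega)
            have heq : cn + 1 - 1 - b + k = cn - 1 - (b - 1) + k := by omega
            rwa [heq] at h1
        · have h1 := hall b (by omega)
          have heq : cn + 1 - 1 - b + b = cn := by omega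
          rwa [heq] at h1
    rw [pvScan]
    by_cases hhit :
        (((state <<< 1) ||| 1) &&& pvMask (pvBitsLoop tp 0 PySem.Dict.empty) slot) &&&
          (1 <<< (tp.length - 1)) ≠ 0
    · rw [if_pos hhit]
      have hbit := (and_goal_ne_zero _ _).mp hhit
      obtain ⟨h1, h2, hall⟩ := (stbit (tp.length - 1)).mp hbit
      refine ⟨fun _ => ⟨cn + 1 - tp.length, by omega, by omega, ?_⟩, fun _ => rfl⟩
      intro j hj
      have h3 := hall j (by omega)
      have heq : cn + 1 - 1 - (tp.length - 1) + j = cn + 1 - tp.length + j := by omega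
      rwa [heq] at h3
    · rw [if_neg hhit]
      have hst_goal :
          (((state <<< 1) ||| 1) &&& pvMask (pvBitsLoop tp 0 PySem.Dict.empty) slot).testBit
            (tp.length - 1) = false := by
        by_contra hc
        exact hhit ((and_goal_ne_zero _ _).mpr (by simpa using hc))
      rw [ih (cn + 1) _ hrest stbit hst_goal]
      constructor
      · rintro ⟨s, h1, h2, hw⟩
        exact ⟨s, h1, by omega, hw⟩
      · rintro ⟨s, h1, h2, hw⟩
        refine ⟨s, h1, ?_, hw⟩
        by_contra hle
        have hsm : s + tp.length = cn + 1 := by omega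
        have hbit : (((state <<< 1) ||| 1) &&&
            pvMask (pvBitsLoop tp 0 PySem.Dict.empty) slot).testBit (tp.length - 1) = true := by
          rw [stbit]
          refine ⟨by omega, by omega, ?_⟩
          intro k hk
          have h3 := hw k (by omega)
          have heq : s + k = cn + 1 - 1 - (tp.length - 1) + k := by omega
          rwa [heq] at h3
        rw [hbit] at hst_goal
        cases hst_goal

lemma B_char (tr : List (List String)) (tp : List String) :
    check_target_pattern_alt tr tp = true ↔ pvFound tr tp := by
  unfold check_target_pattern_alt
  by_cases hlen : tr.length < tp.length
  · rw [if_pos hlen]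
    simp only [Bool.false_eq_true, false_iff]
    rintro ⟨s, hs, -⟩
    omega
  rw [if_neg hlen]
  by_cases hm : tp.length = 0
  · rw [if_pos hm]
    refine ⟨fun _ => ⟨0, by omega, fun j hj => by omega⟩, fun _ => rfl⟩
  · rw [if_neg hm]
    have hinv : ∀ b, (0 : Nat).testBit b = true ↔
        (b < tp.length ∧ b < 0 ∧ ∀ k ≤ b, pvMch tr tp (0 - 1 - b + k) k) := by
      intro b
      simp [Nat.zero_testBit]
    rw [scan_iff tr tp hm tr 0 0 (by simp) hinv (by simp [Nat.zero_testBit])]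
    unfold pvFound
    constructor
    · rintro ⟨s, h1, -, hw⟩
      exact ⟨s, h1, hw⟩
    · rintro ⟨s, h1, hw⟩
      exact ⟨s, h1, by omega, hw⟩

-- ===== VERDICT (by name: the statement is the Claim_ definition above) =====
theorem check_target_pattern_spec : Claim_equal_check_target_pattern := by
  intro tr tp _
  unfold Spec_check_target_pattern
  have hA := A_char tr tp
  have hB := B_char tr tp
  cases hcb : check_target_pattern_alt tr tp with
  | true => exact hA.mpr (hB.mp hcb)
  | false =>
    cases hca : check_target_pattern tr tp with
    | false => rfl
    | true => rw [hcb] at hB; simp at hB; exact absurd (hA.mp hca) hB
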